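-- pv_equiv track=rewrite | github.com/Monem-Adel/Graduation_Project | Parser/Parser.py | find
-- ===== SOURCE A (Python) =====
-- def find(character ,table, direction ):
--     i = 1
--     index = -1
--     if direction =="row":
--         n = len(table)
--         while i < n :
--             table_content = table[i][0]
--             if table_content == character:
--                 index = i
--             i+=1
--     elif direction =="column":
--         n = len(table[0])
--         while i < n:
--             table_content = table[0][i]
--             if table_content == character:
--                 index = i
--             i+=1
--
--     return index
-- ===== SOURCE B (Python) =====
-- def find(character, table, direction):
--     # scan backwards, return the first (i.e. last-index) match; never looks at index 0
--     if direction == "row":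
--         for i in range(len(table) - 1, 0, -1):
--             if table[i][0] == character:
--                 return i
--     elif direction == "column":
--         row0 = table[0]
--         for i in range(len(row0) - 1, 0, -1):
--             if row0[i] == character:
--                 return i
--     return -1
-- ===== Notes on version B (the rewrite author's own statement) =====
-- stated objective: simpler
-- what changed: B scans from the end toward index 1 and returns on the first match (early exit), instead of A's forward while-loop that overwrites an accumulator on every match and always walks the whole row/column.
-- outside the precondition, e.g. on find('x', [['a'], [], ['x']], 'row'): A raises IndexError, B returns 2
import Mathlib
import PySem

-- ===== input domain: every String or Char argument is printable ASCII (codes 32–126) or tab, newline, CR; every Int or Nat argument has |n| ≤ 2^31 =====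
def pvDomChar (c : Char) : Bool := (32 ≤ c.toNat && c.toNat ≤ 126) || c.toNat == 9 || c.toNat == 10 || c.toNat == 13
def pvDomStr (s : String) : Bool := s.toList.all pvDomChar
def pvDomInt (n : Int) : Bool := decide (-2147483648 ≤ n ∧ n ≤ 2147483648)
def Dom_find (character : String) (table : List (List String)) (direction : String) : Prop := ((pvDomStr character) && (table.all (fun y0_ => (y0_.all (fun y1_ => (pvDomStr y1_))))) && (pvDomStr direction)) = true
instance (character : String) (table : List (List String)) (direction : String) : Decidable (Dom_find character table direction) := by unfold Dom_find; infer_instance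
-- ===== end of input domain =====

-- B scans backwards with early exit instead of A's full forward scan with an overwritten accumulator;
-- equivalence of the RETURN value is what is proved.

-- ===== PORT A =====
-- forward while-loop over i = 1 .. n-1, overwriting index on every match
def find (character : String) (table : List (List String)) (direction : String) : Int :=
  if direction = "row" then
    (PySem.List.pyRange 1 (table.length : Int) 1).foldl
      (fun index i =>
        if PySem.List.pyGetD (PySem.List.pyGetD table i []) 0 "" = character then i else index)
      (-1)
  else if direction = "column" then
    let row0 := PySem.List.pyGetD table 0 []   -- Python raises IndexError when table = []; excluded by Pre_find
    (PySem.List.pyRange 1 (row0.length : Int) 1).foldl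
      (fun index i =>
        if PySem.List.pyGetD row0 i "" = character then i else index)
      (-1)
  else -1

-- ===== PORT B =====
-- backwards scan i = n-1, n-2, …, 1; returns on first match
def backScan (character : String) (get : Nat → String) : Nat → Int
  | 0 => -1
  | Nat.succ j => if get (j + 1) = character then ((j : Int) + 1) else backScan character get j

def find_alt (character : String) (table : List (List String)) (direction : String) : Int :=
  if direction = "row" then
    backScan character (fun i => (table.getD i []).getD 0 "") (table.length - 1)
  else if direction = "column" then
    let row0 := table.getD 0 []   -- Python raises IndexError when table = []; excluded by Pre_find
    backScan character (fun i => row0.getD i "") (row0.length - 1)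
  else -1

-- ===== PRECONDITION & SPEC =====
-- Pre_find excludes exactly the inputs on which Python A raises IndexError: direction "row" with an
-- empty row at index ≥ 1 (table[i][0]), and direction "column" with an empty table (table[0]).
def Pre_find (character : String) (table : List (List String)) (direction : String) : Prop :=
  (direction = "row" → ∀ row ∈ table.drop 1, row ≠ []) ∧ (direction = "column" → table ≠ [])
instance (character : String) (table : List (List String)) (direction : String) : Decidable (Pre_find character table direction) := by unfold Pre_find; infer_instance

def pvWitness_find : String × List (List String) × String := ("x", [["a", "b"], ["x", "c"]], "row")

def Spec_find (character : String) (table : List (List String)) (direction : String) (out : Int) : Prop := out = find_alt character table direction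
instance (character : String) (table : List (List String)) (direction : String) (out : Int) : Decidable (Spec_find character table direction out) := by unfold Spec_find; infer_instance

-- ===== CLAIM (what is proved, stated in full; the proofs are below) =====
def Claim_equal_find : Prop := ∀ (character : String) (table : List (List String)) (direction : String), Dom_find character table direction → Pre_find character table direction → Spec_find character table direction (find character table direction)

-- ===== LEMMAS AND PROOFS =====

-- A's forward last-match fold over range 1..n-1 equals B's backwards first-match scan from n-1.
lemma foldl_eq_backScan (c : String) (g : Int → String) (h : Nat → String)
    (hc : ∀ k : Nat, g (k : Int) = h k) : ∀ n : Nat,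
    (PySem.List.pyRange 1 (n : Int) 1).foldl
        (fun index i => if g i = c then i else index) (-1)
      = backScan c h (n - 1) := by
  intro n
  induction n with
  | zero => simp [PySem.List.pyRange_one_eq_nil (by norm_num : (0:Int) ≤ 1), backScan]
  | succ m ih =>
    cases m with
    | zero => simp [PySem.List.pyRange_one_eq_nil (by norm_num : (1:Int) ≤ 1), backScan]
    | succ j =>
      have hcast : ((j + 2 : Nat) : Int) = ((j + 1 : Nat) : Int) + 1 := by push_cast; ring
      rw [hcast, PySem.List.pyRange_one_succ_right (by push_cast; omega), List.foldl_append]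
      simp only [List.foldl_cons, List.foldl_nil]
      rw [ih, hc]
      show (if h (j + 1) = c then ((j + 1 : Nat) : Int) else backScan c h (j + 1 - 1))
            = backScan c h (j + 2 - 1)
      simp only [Nat.add_sub_cancel]
      simp [backScan]

-- ===== VERDICT (by name: the statement is the Claim_ definition above) =====
theorem find_spec : Claim_equal_find := by
  intro character table direction _ _
  unfold Spec_find find find_alt
  by_cases hr : direction = "row"
  · simp only [hr, reduceIte]
    exact foldl_eq_backScan character _ _
      (fun k => by
        simp [PySem.List.pyGetD_natCast, PySem.List.pyGetD_ofNat'])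
      table.length
  · by_cases hcdir : direction = "column"
    · simp only [hcdir, reduceIte]
      have hrow0 : PySem.List.pyGetD table 0 [] = table.getD 0 [] := by
        simpa using PySem.List.pyGetD_natCast table 0 ([] : List String)
      rw [hrow0]
      exact foldl_eq_backScan character _ _
        (fun k => by simp [PySem.List.pyGetD_natCast]) (table.getD 0 []).length
    · simp [hr, hcdir]
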